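-- pv_equiv track=rewrite | github.com/mathias-jakobsen/ha-matjak-areas | custom_components/matjak_areas/utils/config/presence_config.py | _device_classes_to_dict
-- ===== SOURCE A (Python) =====
-- def _device_classes_to_dict(device_classes: list[str]) -> dict[str, list[str]]:
--     """ Processes the device classss input to a dictionary. """
--     result: dict[str, list[str]] = {}
--
--     for item in device_classes:
--         domain, device_class = item.replace(" ", "").split(":")
--
--         if domain not in result:
--             result[domain] = []
--
--         result[domain].append(device_class)
--
--     return result
-- ===== SOURCE B (Python) =====
-- def _device_classes_to_dict(device_classes: list[str]) -> dict[str, list[str]]: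
--     """ Processes the device classes input to a dictionary. """
--     pairs = []
--     for item in device_classes:
--         domain, device_class = item.replace(" ", "").split(":")
--         pairs.append((domain, device_class))
--
--     return {d: [c for dd, c in pairs if dd == d]
--             for d in dict.fromkeys(d for d, _ in pairs)}
-- ===== Notes on version B (the rewrite author's own statement) =====
-- stated objective: alternative
-- what changed: A builds the dict incrementally in one pass (insert empty list on first sight, append per item); B first parses all items eagerly into (domain, class) pairs, then builds the result with a group-by dict comprehension over the first-occurrence-deduplicated domains.
import Mathlib
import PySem

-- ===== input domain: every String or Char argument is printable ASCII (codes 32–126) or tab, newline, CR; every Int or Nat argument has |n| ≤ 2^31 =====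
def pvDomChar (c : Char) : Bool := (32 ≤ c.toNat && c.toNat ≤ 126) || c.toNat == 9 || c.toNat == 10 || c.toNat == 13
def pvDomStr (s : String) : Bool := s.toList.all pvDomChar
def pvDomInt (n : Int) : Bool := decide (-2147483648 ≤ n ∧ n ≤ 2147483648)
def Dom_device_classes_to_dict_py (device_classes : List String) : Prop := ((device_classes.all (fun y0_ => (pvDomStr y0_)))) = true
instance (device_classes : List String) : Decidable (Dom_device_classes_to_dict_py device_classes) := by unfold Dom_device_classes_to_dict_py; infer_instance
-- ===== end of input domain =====

-- B replaces A's one-pass dict accumulation by an eager parse pass followed by a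
-- group-by-comprehension over the first-occurrence-deduped domains (objective: alternative).

-- ===== PORT A =====
-- loop body of A's for-loop: parse 'domain:device_class', insert [] on first sight, append
def pyStepA (result : PySem.Dict String (List String)) (item : String) : PySem.Dict String (List String) :=
  match PySem.Str.split? (PySem.Str.replace item " " "") ":" with
  | some [domain, device_class] =>
      let result' := if result.contains domain = false then result.insert domain [] else result
      result'.modify domain [] (fun l => l ++ [device_class])
  | _ => result  -- Python raises ValueError here (wrong unpack count); excluded by Pre_

def device_classes_to_dict_py (device_classes : List String) : List (String × List String) :=
  (device_classes.foldl pyStepA PySem.Dict.empty).items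

-- ===== PORT B =====
-- loop body of B's first pass: pairs.append(item.replace(" ","").split(":"))
def pyStepB (acc : List (String × String)) (item : String) : List (String × String) :=
  match PySem.Str.split? (PySem.Str.replace item " " "") ":" with
  | some [domain, device_class] => acc ++ [(domain, device_class)]
  | _ => acc  -- Python raises ValueError here; excluded by Pre_

def device_classes_to_dict_py_alt (device_classes : List String) : List (String × List String) :=
  let pairs := device_classes.foldl pyStepB []
  -- {d: [c for dd, c in pairs if dd == d] for d in dict.fromkeys(d for d, _ in pairs)}
  (PySem.List.dedup (pairs.map Prod.fst)).map
    (fun d => (d, pairs.filterMap (fun p => if p.1 == d then some p.2 else none)))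

-- ===== PRECONDITION & SPEC =====
-- Pre_ excludes exactly the items whose space-stripped text does not split on ":" into
-- two pieces: there Python A (and Python B alike) raises ValueError on unpacking.
def Pre_device_classes_to_dict_py (device_classes : List String) : Prop :=
  ∀ item ∈ device_classes,
    ((PySem.Str.split? (PySem.Str.replace item " " "") ":").getD []).length = 2
instance (device_classes : List String) : Decidable (Pre_device_classes_to_dict_py device_classes) := by unfold Pre_device_classes_to_dict_py; infer_instance

def pvWitness_device_classes_to_dict_py : List String :=
  ["light:motion", "binary_sensor : door", "light:presence"]

def Spec_device_classes_to_dict_py (device_classes : List String) (out : List (String × List String)) : Prop := out = device_classes_to_dict_py_alt device_classes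
instance (device_classes : List String) (out : List (String × List String)) : Decidable (Spec_device_classes_to_dict_py device_classes out) := by unfold Spec_device_classes_to_dict_py; infer_instance

-- ===== CLAIM (what is proved, stated in full; the proofs are below) =====
def Claim_equal_device_classes_to_dict_py : Prop := ∀ (device_classes : List String), Dom_device_classes_to_dict_py device_classes → Pre_device_classes_to_dict_py device_classes → Spec_device_classes_to_dict_py device_classes (device_classes_to_dict_py device_classes)

-- ===== LEMMAS AND PROOFS =====

-- the per-domain collected classes and the grouped association list B builds
def collectD (ps : List (String × String)) (d : String) : List String :=
  ps.filterMap (fun p => if p.1 == d then some p.2 else none)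

def groupD (ps : List (String × String)) : List (String × List String) :=
  (PySem.List.dedup (ps.map Prod.fst)).map (fun d => (d, collectD ps d))

theorem alt_eq_groupD (xs : List String) :
    device_classes_to_dict_py_alt xs = groupD (xs.foldl pyStepB []) := rfl

theorem stepB_acc (x : String) (acc : List (String × String)) :
    pyStepB acc x = acc ++ pyStepB [] x := by
  unfold pyStepB
  rcases PySem.Str.split? (PySem.Str.replace x " " "") ":" with _ | ⟨_ | ⟨d, _ | ⟨c, _ | _⟩⟩⟩ <;> simp

theorem foldB_acc (xs : List String) (acc : List (String × String)) :
    xs.foldl pyStepB acc = acc ++ xs.foldl pyStepB [] := by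
  induction xs generalizing acc with
  | nil => simp
  | cons x xs ih =>
      simp only [List.foldl_cons]
      rw [ih (pyStepB acc x), ih (pyStepB [] x), stepB_acc x acc, List.append_assoc]

theorem keys_groupD (qs : List (String × String)) :
    (groupD qs).map Prod.fst = PySem.List.dedup (qs.map Prod.fst) := by
  simp [groupD, List.map_map, Function.comp_def]

theorem contains_groupD (qs : List (String × String)) (d : String) :
    (PySem.Dict.mk (groupD qs)).contains d = true ↔ d ∈ qs.map Prod.fst := by
  simp [PySem.Dict.contains, groupD, List.any_eq_true]

theorem get?_groupD (qs : List (String × String)) (d : String)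
    (h : d ∈ qs.map Prod.fst) :
    (PySem.Dict.mk (groupD qs)).get? d = some (collectD qs d) := by
  apply PySem.Dict.get?_of_mem_items
  · exact List.mem_map.mpr ⟨d, (PySem.List.mem_dedup _ _).mpr h, rfl⟩
  · show ((PySem.Dict.mk (groupD qs)).items.map _).Nodup
    have : (PySem.Dict.mk (groupD qs)).items = groupD qs := rfl
    rw [this, keys_groupD]
    exact PySem.List.nodup_dedup _

theorem collect_append (qs : List (String × String)) (d c d' : String) :
    collectD (qs ++ [(d, c)]) d' = collectD qs d' ++ if d == d' then [c] else [] := by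
  simp only [collectD, List.filterMap_append, List.filterMap_cons, List.filterMap_nil]
  by_cases h : d = d' <;> simp [h]

theorem collect_nil (qs : List (String × String)) (d : String)
    (h : d ∉ qs.map Prod.fst) : collectD qs d = [] := by
  rw [collectD, List.filterMap_eq_nil_iff]
  intro p hp
  have : p.1 ≠ d := fun he => h (he ▸ List.mem_map_of_mem hp)
  simp [this]

theorem dedup_append_mem {l : List String} {d : String} (h : d ∈ l) :
    PySem.List.dedup (l ++ [d]) = PySem.List.dedup l := by
  show PySem.Set.ofList _ = PySem.Set.ofList _
  rw [PySem.Set.ofList, List.foldl_append]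
  show PySem.Set.add (PySem.Set.ofList l) d = _
  rw [PySem.Set.add, if_pos]
  exact (PySem.Set.contains_iff _ _).mpr ((PySem.Set.mem_ofList _ _).mpr h)

theorem dedup_append_not_mem {l : List String} {d : String} (h : d ∉ l) :
    PySem.List.dedup (l ++ [d]) = PySem.List.dedup l ++ [d] := by
  show PySem.Set.ofList _ = PySem.Set.ofList _ ++ [d]
  rw [PySem.Set.ofList, List.foldl_append]
  show PySem.Set.add (PySem.Set.ofList l) d = _
  rw [PySem.Set.add, if_neg]
  intro hc
  exact h ((PySem.Set.mem_ofList _ _).mp ((PySem.Set.contains_iff _ _).mp hc))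

theorem map_fst_append (qs : List (String × String)) (d c : String) :
    (qs ++ [(d, c)]).map Prod.fst = qs.map Prod.fst ++ [d] := by simp

theorem stepA_group (qs : List (String × String)) (x d c : String)
    (hx : PySem.Str.split? (PySem.Str.replace x " " "") ":" = some [d, c]) :
    pyStepA (PySem.Dict.mk (groupD qs)) x = PySem.Dict.mk (groupD (qs ++ [(d, c)])) := by
  unfold pyStepA
  rw [hx]
  apply PySem.Dict.ext
  by_cases h : d ∈ qs.map Prod.fst
  · -- domain already present: the if-branch is skipped, modify rewrites the entry in place
    have hc : (PySem.Dict.mk (groupD qs)).contains d = true := (contains_groupD qs d).mpr h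
    simp only [hc, Bool.true_eq_false, ite_false]
    rw [PySem.Dict.modify,
        PySem.Dict.getD_of_get?_eq_some _ _ (get?_groupD qs d h),
        PySem.Dict.items_insert_of_contains _ _ hc]
    show (groupD qs).map _ = _
    rw [groupD, groupD, List.map_map, map_fst_append, dedup_append_mem h]
    refine List.map_congr_left ?_
    intro d' _
    simp only [Function.comp_apply, collect_append]
    by_cases hdd : d' = d
    · subst hdd; simp
    · have h1 : (d' == d) = false := by simp [hdd]
      have h2 : (d == d') = false := by simp [Ne.symm hdd]
      simp [h1, h2]
  · -- new domain: inserted with [] at the end, then modify appends the class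
    have hc : (PySem.Dict.mk (groupD qs)).contains d = false :=
      Bool.eq_false_iff.mpr (fun hh => h ((contains_groupD qs d).mp hh))
    simp only [hc, ite_true]
    have hitems1 : ((PySem.Dict.mk (groupD qs)).insert d []).items = groupD qs ++ [(d, [])] :=
      PySem.Dict.items_insert_of_not_contains _ _ hc
    set r1 := (PySem.Dict.mk (groupD qs)).insert d [] with hr1
    have hd_dedup : d ∉ PySem.List.dedup (qs.map Prod.fst) := fun hh => h ((PySem.List.mem_dedup _ _).mp hh)
    have hkeys : r1.items.map Prod.fst = PySem.List.dedup (qs.map Prod.fst) ++ [d] := by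
      rw [hitems1, List.map_append, keys_groupD]; rfl
    have hc1 : r1.contains d = true := by
      rw [PySem.Dict.contains, hitems1]
      simp
    have hget1 : r1.get? d = some [] := by
      apply PySem.Dict.get?_of_mem_items
      · rw [hitems1]; simp
      · show (r1.items.map _).Nodup
        rw [hkeys]
        refine List.Nodup.append (PySem.List.nodup_dedup _) (List.nodup_singleton _) ?_
        intro a ha hb
        rw [List.mem_singleton] at hb
        subst hb
        exact hd_dedup ha
    rw [PySem.Dict.modify, PySem.Dict.getD_of_get?_eq_some _ _ hget1,
        PySem.Dict.items_insert_of_contains _ _ hc1, hitems1, List.map_append]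
    rw [show groupD (qs ++ [(d, c)])
          = (PySem.List.dedup (qs.map Prod.fst) ++ [d]).map
              (fun d' => (d', collectD (qs ++ [(d, c)]) d')) from by
          rw [groupD, map_fst_append, dedup_append_not_mem h],
        List.map_append]
    congr 1
    · -- old entries are untouched (their domains differ from d)
      rw [groupD, List.map_map]
      refine List.map_congr_left ?_
      intro d' hd'
      have hmem : d' ∈ qs.map Prod.fst := (PySem.List.mem_dedup _ _).mp hd'
      have hne : d' ≠ d := fun he => h (he ▸ hmem)
      have h1 : (d' == d) = false := by simp [hne]
      have h2 : (d == d') = false := by simp [Ne.symm hne]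
      simp only [Function.comp_apply, h1, collect_append, h2]
      simp
    · -- the new entry: [] ++ [c]
      simp [collect_append, collect_nil qs d h]

theorem foldA_group (xs : List String) (qs : List (String × String)) :
    (xs.foldl pyStepA (PySem.Dict.mk (groupD qs))).items = groupD (qs ++ xs.foldl pyStepB []) := by
  induction xs generalizing qs with
  | nil => simp
  | cons x xs ih =>
      simp only [List.foldl_cons]
      rcases hx : PySem.Str.split? (PySem.Str.replace x " " "") ":" with _ | ⟨_ | ⟨d, _ | ⟨c, _ | _⟩⟩⟩
      case some.cons.cons.nil =>
        -- well-formed item: one pair is appended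
        rw [stepA_group qs x d c hx, ih (qs ++ [(d, c)]),
            show pyStepB [] x = [(d, c)] from by simp [pyStepB, hx],
            foldB_acc xs [(d, c)], List.append_assoc]
      all_goals
        -- malformed item: both step functions leave their state unchanged
        rw [show pyStepA (PySem.Dict.mk (groupD qs)) x = PySem.Dict.mk (groupD qs) from by
              simp [pyStepA, hx],
            ih qs,
            show pyStepB [] x = [] from by simp [pyStepB, hx],
            foldB_acc xs [], List.nil_append]

-- ===== VERDICT (by name: the statement is the Claim_ definition above) =====
theorem device_classes_to_dict_py_spec : Claim_equal_device_classes_to_dict_py := by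
  intro xs _ _
  show device_classes_to_dict_py xs = device_classes_to_dict_py_alt xs
  rw [alt_eq_groupD, device_classes_to_dict_py,
      show (PySem.Dict.empty : PySem.Dict String (List String)) = PySem.Dict.mk (groupD []) from rfl,
      foldA_group xs []]
  simp
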